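-- pv_equiv track=rewrite | github.com/peterb255/Proyecto-final-- | kasiski.py | subcriptogramas
-- ===== SOURCE A (Python) =====
-- def subcriptogramas(texto, long_clave):
--     # Almacenamiento de los subcriptogramas con la longitud de la clave
--     dic = {}
--     for i in range(long_clave):
--         dic[i] = ''
--
--     i = 0
--     for letra in texto:
--         dic[i] += letra
--         i += 1
--         if i == long_clave:
--             i = 0
--     return dic
-- ===== SOURCE B (Python) =====
-- def subcriptogramas(texto, long_clave):
--     # Each positional subcryptogram is a strided slice of the text.
--     return {i: texto[i::long_clave] for i in range(long_clave)}
-- ===== Notes on version B (the rewrite author's own statement) =====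
-- stated objective: simpler
-- what changed: Replaces A's single pass with a cycling counter and per-character dict appends by one dict comprehension that takes each positional subcryptogram as a strided slice texto[i::long_clave].
import Mathlib
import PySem

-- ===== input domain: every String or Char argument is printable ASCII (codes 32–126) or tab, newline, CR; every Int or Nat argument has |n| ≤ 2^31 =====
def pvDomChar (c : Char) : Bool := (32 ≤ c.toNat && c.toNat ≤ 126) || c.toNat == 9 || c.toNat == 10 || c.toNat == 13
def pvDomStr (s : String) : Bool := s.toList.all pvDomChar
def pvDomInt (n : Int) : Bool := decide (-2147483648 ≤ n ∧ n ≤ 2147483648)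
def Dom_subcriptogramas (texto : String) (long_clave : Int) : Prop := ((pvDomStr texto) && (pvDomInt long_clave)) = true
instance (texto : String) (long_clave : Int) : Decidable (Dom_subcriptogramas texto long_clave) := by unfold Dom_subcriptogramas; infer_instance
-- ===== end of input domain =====

-- B replaces A's single cycling-counter pass by a dict comprehension that takes each
-- positional subcryptogram as a strided slice texto[i::long_clave] (objective: simpler).

-- ===== PORT A =====
def subcriptogramas (texto : String) (long_clave : Int) : List (Int × String) :=
  let dic : PySem.Dict Int (List Char) :=
    (PySem.List.pyRange 0 long_clave).foldl (fun d i => d.insert i []) PySem.Dict.empty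
  let fin := texto.toList.foldl
    (fun (st : PySem.Dict Int (List Char) × Int) letra =>
      let d := st.1.modify st.2 [] (fun v => v ++ [letra])
      let i := st.2 + 1
      (d, if i = long_clave then 0 else i))
    (dic, 0)
  fin.1.items.map (fun p => (p.1, String.ofList p.2))

-- ===== PORT B =====
def subcriptogramas_alt (texto : String) (long_clave : Int) : List (Int × String) :=
  (PySem.List.pyRange 0 long_clave).map (fun i =>
    (i, String.ofList ((PySem.List.slice? texto.toList (some i) none long_clave).getD [])))

-- ===== PRECONDITION & SPEC =====
-- Pre_ excludes exactly the inputs where A raises KeyError: long_clave ≤ 0 with nonempty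
-- texto (the cycling counter indexes a key the empty range never created).
def Pre_subcriptogramas (texto : String) (long_clave : Int) : Prop :=
  1 ≤ long_clave ∨ texto = ""
instance (texto : String) (long_clave : Int) : Decidable (Pre_subcriptogramas texto long_clave) := by
  unfold Pre_subcriptogramas; infer_instance
def pvWitness_subcriptogramas : String × Int := ("holamundo", 3)

def Spec_subcriptogramas (texto : String) (long_clave : Int) (out : List (Int × String)) : Prop :=
  out = subcriptogramas_alt texto long_clave
instance (texto : String) (long_clave : Int) (out : List (Int × String)) : Decidable (Spec_subcriptogramas texto long_clave out) := by
  unfold Spec_subcriptogramas; infer_instance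

-- ===== CLAIM (what is proved, stated in full; the proofs are below) =====
def Claim_equal_subcriptogramas : Prop := ∀ (texto : String) (long_clave : Int), Dom_subcriptogramas texto long_clave → Pre_subcriptogramas texto long_clave → Spec_subcriptogramas texto long_clave (subcriptogramas texto long_clave)

-- ===== LEMMAS AND PROOFS =====

-- the cycling counter equals the running index mod long_clave
lemma counter_step (n : Nat) (k : Int) (hk : 1 ≤ k) :
    (if PySem.Int.mod (n : Int) k + 1 = k then (0 : Int) else PySem.Int.mod (n : Int) k + 1)
      = PySem.Int.mod ((n : Int) + 1) k := by
  rw [PySem.Int.mod_eq_emod_of_pos (by omega), PySem.Int.mod_eq_emod_of_pos (by omega)]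
  have hkey : ((n : Int) + 1) % k = ((n : Int) % k + 1) % k := by
    conv_lhs => rw [← Int.emod_add_mul_ediv (n : Int) k]
    rw [add_right_comm, Int.add_mul_emod_self_left]
  have h0 : 0 ≤ (n : Int) % k := Int.emod_nonneg _ (by omega)
  have h1 : (n : Int) % k < k := Int.emod_lt_of_pos _ (by omega)
  split_ifs with h
  · rw [hkey, h, Int.emod_self]
  · rw [hkey, Int.emod_eq_of_lt (a := (n : Int) % k + 1) (by omega) (by omega)]

-- A's character loop is the modify-at-residue fold over enumerate
lemma loopA (k : Int) (hk : 1 ≤ k) (cs : List Char) :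
    ∀ (d : PySem.Dict Int (List Char)) (n : Nat),
    cs.foldl
      (fun (st : PySem.Dict Int (List Char) × Int) letra =>
        let d := st.1.modify st.2 [] (fun v => v ++ [letra])
        let i := st.2 + 1
        (d, if i = k then 0 else i))
      (d, PySem.Int.mod (n : Int) k)
    = ((PySem.List.enumerate cs (n : Int)).foldl
        (fun d p => d.modify (PySem.Int.mod p.1 k) [] (fun v => v ++ [p.2])) d,
       PySem.Int.mod ((n : Int) + cs.length) k) := by
  induction cs with
  | nil => intro d n; simp [PySem.List.enumerate]
  | cons c cs ih =>
    intro d n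
    simp only [List.foldl_cons, PySem.List.enumerate]
    rw [counter_step n k hk]
    have hcast : ((n : Int) + 1) = ((n + 1 : Nat) : Int) := by push_cast; ring
    rw [hcast, ih _ (n + 1)]
    congr 2
    simp only [List.length_cons]
    push_cast
    ring


-- enumerate with start a is enumerate from 0 with shifted first components
lemma enumerate_start {α : Type} (cs : List α) (a : Int) :
    PySem.List.enumerate cs a = (PySem.List.enumerate cs 0).map (fun p => (p.1 + a, p.2)) := by
  induction cs generalizing a with
  | nil => simp [PySem.List.enumerate]
  | cons c cs ih =>
    simp only [PySem.List.enumerate, List.map_cons, zero_add]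
    congr 1
    rw [ih (a + 1), ih 1, List.map_map]
    apply List.map_congr_left
    intro p _
    simp only [Function.comp]
    refine Prod.ext ?_ rfl
    simp only
    ring

-- the strided index form equals the residue filter of enumerate
lemma idx_eq_filter {α : Type} (k : Int) (hk : 1 ≤ k) (cs : List α) :
    ∀ (i : Int), 0 ≤ i → i < k →
    (List.range cs.length).filterMap (fun j : Nat => cs[(i + k * (j : Int)).toNat]?)
      = ((PySem.List.enumerate cs 0).filter
          (fun p => PySem.Int.mod p.1 k == i)).map (fun p => p.2) := by
  have hmodsucc : ∀ (p i : Int), 0 ≤ i → i < k →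
      ((PySem.Int.mod (p + 1) k == i) = (PySem.Int.mod p k == if i = 0 then k - 1 else i - 1)) := by
    intro p i h0 hik
    rw [PySem.Int.mod_eq_emod_of_pos (by omega), PySem.Int.mod_eq_emod_of_pos (by omega)]
    have hkey : (p + 1) % k = (p % k + 1) % k := by
      conv_lhs => rw [← Int.emod_add_mul_ediv p k]
      rw [add_right_comm, Int.add_mul_emod_self_left]
    have hb0 : 0 ≤ p % k := Int.emod_nonneg _ (by omega)
    have hb1 : p % k < k := Int.emod_lt_of_pos _ (by omega)
    rw [Bool.eq_iff_iff, beq_iff_eq, beq_iff_eq, hkey]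
    by_cases hpk : p % k + 1 = k
    · rw [hpk, Int.emod_self]
      split_ifs <;> omega
    · rw [Int.emod_eq_of_lt (a := p % k + 1) (by omega) (by omega)]
      split_ifs <;> omega
  induction cs with
  | nil => simp [PySem.List.enumerate]
  | cons c cs ih =>
    intro i h0 hik
    have hcong : ∀ p ∈ PySem.List.enumerate cs 0,
        ((fun q : Int × α => PySem.Int.mod q.1 k == i) ∘ fun p : Int × α => (p.1 + 1, p.2)) p
          = (fun q : Int × α => PySem.Int.mod q.1 k == if i = 0 then k - 1 else i - 1) p := by
      intro p _
      simp only [Function.comp]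
      exact hmodsucc p.1 i h0 hik
    have hfil : List.filter (fun p : Int × α => PySem.Int.mod p.1 k == i) (PySem.List.enumerate cs 1)
        = (List.filter (fun p : Int × α => PySem.Int.mod p.1 k == if i = 0 then k - 1 else i - 1)
            (PySem.List.enumerate cs 0)).map (fun p => (p.1 + 1, p.2)) := by
      rw [enumerate_start cs 1, List.filter_map, List.filter_congr hcong]
    have hshift :
        ((PySem.List.enumerate (c :: cs) 0).filter
            (fun p => PySem.Int.mod p.1 k == i)).map (fun p => p.2)
        = (if PySem.Int.mod 0 k == i then [c] else [])
          ++ ((PySem.List.enumerate cs 0).filter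
              (fun p => PySem.Int.mod p.1 k == if i = 0 then k - 1 else i - 1)).map (fun p => p.2) := by
      simp only [PySem.List.enumerate, List.filter_cons, zero_add, hfil]
      split_ifs <;> simp [Function.comp]
    rw [hshift]
    by_cases hi : i = 0
    · subst hi
      have hhead : (PySem.Int.mod 0 k == (0 : Int)) = true := by
        rw [PySem.Int.mod_eq_emod_of_pos (by omega)]
        simp
      rw [hhead, if_pos rfl]
      have hstep : ∀ j ∈ List.range cs.length,
          ((fun j : Nat => (c :: cs)[((0 : Int) + k * (j : Int)).toNat]?) ∘ Nat.succ) j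
            = cs[(k - 1 + k * (j : Int)).toNat]? := by
        intro j _
        simp only [Function.comp]
        have hkj : 0 ≤ k * (j : Int) := by positivity
        have hidx : ((0 : Int) + k * ((j.succ : Nat) : Int)).toNat = (k - 1 + k * (j : Int)).toNat + 1 := by
          have h1 : (0 : Int) + k * ((j.succ : Nat) : Int) = (k - 1 + k * (j : Int)) + 1 := by
            push_cast; ring
          rw [h1]
          omega
        rw [hidx, List.getElem?_cons_succ]
      simp only [List.length_cons, List.range_succ_eq_map, List.filterMap_cons, Nat.cast_zero,
        mul_zero, add_zero, Int.toNat_zero, List.getElem?_cons_zero, List.filterMap_map]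
      rw [List.filterMap_congr hstep, ih (k - 1) (by omega) (by omega)]
      simp
    · have hhead : (PySem.Int.mod 0 k == i) = false := by
        rw [PySem.Int.mod_eq_emod_of_pos (by omega)]
        simp only [Int.zero_emod]
        exact beq_eq_false_iff_ne.mpr (by omega)
      rw [hhead]
      simp only [Bool.false_eq_true, if_false, List.nil_append, if_neg hi]
      have hstep : ∀ j ∈ List.range (cs.length + 1),
          (fun j : Nat => (c :: cs)[(i + k * (j : Int)).toNat]?) j
            = cs[(i - 1 + k * (j : Int)).toNat]? := by
        intro j _
        show (c :: cs)[(i + k * (j : Int)).toNat]? = cs[(i - 1 + k * (j : Int)).toNat]?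
        have hkj : 0 ≤ k * (j : Int) := by positivity
        have hidx : (i + k * (j : Int)).toNat = (i - 1 + k * (j : Int)).toNat + 1 := by
          have h1 : i + k * (j : Int) = (i - 1 + k * (j : Int)) + 1 := by ring
          rw [h1]
          omega
        rw [hidx, List.getElem?_cons_succ]
      simp only [List.length_cons]
      rw [List.filterMap_congr hstep, List.range_succ, List.filterMap_append]
      have hlast : (List.filterMap (fun j : Nat => cs[(i - 1 + k * (j : Int)).toNat]?) [cs.length]) = [] := by
        simp only [List.filterMap_cons, List.filterMap_nil]
        have hm : (cs.length : Int) ≤ k * (cs.length : Int) :=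
          le_mul_of_one_le_left (by positivity) hk
        have hge : cs.length ≤ (i - 1 + k * (cs.length : Int)).toNat := by omega
        rw [List.getElem?_eq_none hge]
      rw [hlast, List.append_nil]
      exact ih (i - 1) (by omega) (by omega)

-- Python's xs[i::k] (0 ≤ i, 1 ≤ k) is the strided index form
lemma slice?_pos (k : Int) (hk : 1 ≤ k) {α : Type} (cs : List α) (i : Int) (h0 : 0 ≤ i) :
    PySem.List.slice? cs (some i) none k
      = some ((List.range cs.length).filterMap (fun j : Nat => cs[(i + k * (j : Int)).toNat]?)) := by
  have hkne : ¬ (k = 0) := by omega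
  have hkneg : ¬ (k < 0) := by omega
  have hineg : ¬ (i < 0) := by omega
  simp only [PySem.List.slice?, PySem.List.sliceIndices, if_neg hkne, if_neg hkneg, if_neg hineg,
    if_pos (show 0 < k by omega)]
  rcases lt_or_ge i (cs.length : Int) with hlt | hge
  · rw [min_eq_left (le_of_lt hlt), if_pos hlt]
    have hq0 : 0 ≤ ((cs.length : Int) - i + k - 1) / k := Int.ediv_nonneg (by omega) (by omega)
    have hid := Int.mul_ediv_add_emod ((cs.length : Int) - i + k - 1) k
    have hr0 : 0 ≤ ((cs.length : Int) - i + k - 1) % k := Int.emod_nonneg _ (by omega)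
    have hr1 : ((cs.length : Int) - i + k - 1) % k < k := Int.emod_lt_of_pos _ (by omega)
    have hklen : (cs.length : Int) ≤ k * cs.length := le_mul_of_one_le_left (by positivity) hk
    have hub : ((cs.length : Int) - i + k - 1) / k ≤ (cs.length : Int) := by
      by_contra h
      have h2 : k * ((cs.length : Int) + 1) ≤ k * (((cs.length : Int) - i + k - 1) / k) :=
        mul_le_mul_of_nonneg_left (by omega) (by omega)
      have h3 : k * ((cs.length : Int) + 1) = k * (cs.length : Int) + k := by ring
      omega
    have hqn : (((cs.length : Int) - i + k - 1) / k).toNat ≤ cs.length := by omega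
    have hsplit : cs.length = (((cs.length : Int) - i + k - 1) / k).toNat
          + (cs.length - (((cs.length : Int) - i + k - 1) / k).toNat) := (Nat.add_sub_cancel' hqn).symm
    have htail : List.filterMap
        ((fun j : Nat => cs[(i + k * (j : Int)).toNat]?) ∘
          (fun j => (((cs.length : Int) - i + k - 1) / k).toNat + j))
        (List.range (cs.length - (((cs.length : Int) - i + k - 1) / k).toNat)) = [] := by
      rw [List.filterMap_eq_nil_iff]
      intro j _
      simp only [Function.comp]
      apply List.getElem?_eq_none
      have hkj : 0 ≤ k * (j : Int) := by positivity
      have hcast : ((((((cs.length : Int) - i + k - 1) / k).toNat + j : Nat)) : Int)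
          = ((cs.length : Int) - i + k - 1) / k + (j : Int) := by
        push_cast
        omega
      have hmul : k * (((cs.length : Int) - i + k - 1) / k + (j : Int))
          = k * (((cs.length : Int) - i + k - 1) / k) + k * (j : Int) := by ring
      rw [hcast, hmul]
      omega
    have hmain : List.filterMap (fun j : Nat => cs[(i + k * (j : Int)).toNat]?) (List.range cs.length)
        = List.filterMap (fun j : Nat => cs[(i + k * (j : Int)).toNat]?)
            (List.range ((((cs.length : Int) - i + k - 1) / k).toNat)) := by
      conv_lhs => rw [hsplit]
      rw [List.range_add, List.filterMap_append, List.filterMap_map, htail, List.append_nil]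
    rw [hmain]
  · rw [min_eq_right hge, if_neg (by omega : ¬ ((cs.length : Int)) < (cs.length : Int))]
    simp only [List.range_zero, List.filterMap_nil, Option.some.injEq]
    rw [eq_comm, List.filterMap_eq_nil_iff]
    intro j _
    apply List.getElem?_eq_none
    have hkj : 0 ≤ k * (j : Int) := by positivity
    omega


lemma slice_eq_filter {α : Type} (k : Int) (hk : 1 ≤ k) (cs : List α) (i : Int)
    (h0 : 0 ≤ i) (hik : i < k) :
    (PySem.List.slice? cs (some i) none k).getD []
      = ((PySem.List.enumerate cs 0).filter
          (fun p => PySem.Int.mod p.1 k == i)).map (fun p => p.2) := by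
  rw [slice?_pos k hk cs i h0, Option.getD_some, idx_eq_filter k hk cs i h0 hik]

lemma set_update_of_mem {s : PySem.Set Int} {xs : List Int} (h : ∀ x ∈ xs, x ∈ s) :
    PySem.Set.update s xs = s := by
  induction xs generalizing s with
  | nil => rfl
  | cons x xs ih =>
    have hx : x ∈ s := h x (by simp)
    have : PySem.Set.add s x = s := by
      simp [PySem.Set.add, PySem.Set.contains, hx]
    simpa [PySem.Set.update, this] using ih (s := s) (fun y hy => h y (by simp [hy]))

-- ===== VERDICT (by name: the statement is the Claim_ definition above) =====
theorem subcriptogramas_spec : Claim_equal_subcriptogramas := by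
  intro texto k _ hpre
  unfold Spec_subcriptogramas subcriptogramas subcriptogramas_alt
  by_cases hk : 1 ≤ k
  · set cs := texto.toList with hcs
    set d0 : PySem.Dict Int (List Char) :=
      (PySem.List.pyRange 0 k).foldl (fun d i => d.insert i []) PySem.Dict.empty with hd0
    have hitems0 : d0.items = (PySem.List.pyRange 0 k).map (fun i => (i, ([] : List Char))) := by
      rw [hd0]
      have hrange : PySem.List.pyRange 0 k = (List.range k.toNat).map (fun j : Nat => (j : Int)) := by
        have hkk : k = ((k.toNat : Nat) : Int) := by omega
        conv_lhs => rw [hkk]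
        exact PySem.List.pyRange_zero_natCast k.toNat
      have hnodup : (PySem.List.pyRange 0 k).Nodup := by
        rw [hrange]
        exact (List.nodup_range).map (fun a b h => by exact_mod_cast h)
      have := PySem.Dict.items_foldl_insert_fresh (PySem.List.pyRange 0 k)
        (fun a => a) (fun _ => ([] : List Char)) PySem.Dict.empty (by simp) (by simpa using hnodup)
      simpa using this
    have hrange : PySem.List.pyRange 0 k = (List.range k.toNat).map (fun j : Nat => (j : Int)) := by
      have hkk : k = ((k.toNat : Nat) : Int) := by omega
      conv_lhs => rw [hkk]
      exact PySem.List.pyRange_zero_natCast k.toNat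
    have hnodup : (PySem.List.pyRange 0 k).Nodup := by
      rw [hrange]
      exact (List.nodup_range).map (fun a b h => by exact_mod_cast h)
    have hkeys0 : d0.keys = PySem.List.pyRange 0 k := by
      have hk0 : d0.keys = d0.items.map (fun p => p.1) := rfl
      rw [hk0, hitems0, List.map_map]
      exact List.map_id _
    have hmem : ∀ i : Int, i ∈ PySem.List.pyRange 0 k ↔ 0 ≤ i ∧ i < k := by
      intro i
      rw [PySem.List.mem_pyRange_iff_of_pos (by omega : (0:Int) < 1)]
      simp
    have hgetD0 : ∀ i ∈ PySem.List.pyRange 0 k, d0.getD i [] = [] := by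
      intro i hi
      refine PySem.Dict.getD_of_mem_items d0 ?_ (by rw [hkeys0]; exact hnodup) []
      rw [hitems0]
      exact List.mem_map.2 ⟨i, hi, rfl⟩
    have hloop0 := loopA k hk cs d0 0
    rw [show (PySem.Int.mod ((0 : Nat) : Int) k) = 0 by
          rw [PySem.Int.mod_eq_emod_of_pos (by omega)]; simp] at hloop0
    rw [show ((0 : Nat) : Int) = 0 by simp] at hloop0
    set F := (PySem.List.enumerate cs 0).foldl
      (fun d p => d.modify (PySem.Int.mod p.1 k) [] (fun v => v ++ [p.2])) d0 with hF
    have hkeysF : F.keys = PySem.List.pyRange 0 k := by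
      rw [hF, PySem.Dict.keys_foldl_modify_key (PySem.List.enumerate cs 0)
        (fun p => PySem.Int.mod p.1 k) [] (fun _ p => fun v => v ++ [p.2]) d0, hkeys0]
      apply set_update_of_mem
      intro x hx
      obtain ⟨p, hp, rfl⟩ := List.mem_map.1 hx
      rw [hmem]
      exact ⟨PySem.Int.mod_nonneg _ (by omega), PySem.Int.mod_lt _ (by omega)⟩
    have hgetDF : ∀ i : Int, F.getD i []
        = d0.getD i [] ++ ((PySem.List.enumerate cs 0).filter
            (fun p => PySem.Int.mod p.1 k == i)).map (fun p => p.2) := by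
      intro i
      have h := PySem.Dict.getD_foldl_modify_append
        ((PySem.List.enumerate cs 0).map (fun p => (PySem.Int.mod p.1 k, p.2))) d0 i
      rw [List.foldl_map] at h
      rw [hF]
      simpa [List.filter_map, Function.comp, List.map_map] using h
    have hitemsF : F.items = (PySem.List.pyRange 0 k).map (fun i => (i, F.getD i [])) := by
      rw [PySem.Dict.items_eq_map_keys F (by rw [hkeysF]; exact hnodup) [], hkeysF]
    simp only [hloop0, hitemsF, List.map_map]
    apply List.map_congr_left
    intro i hi
    simp only [Function.comp]
    rw [hgetDF i, hgetD0 i hi, slice_eq_filter k hk cs i ((hmem i).1 hi).1 ((hmem i).1 hi).2]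
    simp
  · -- k ≤ 0, so texto = "" by Pre_
    rcases hpre with h | h
    · omega
    · subst h
      rw [PySem.List.pyRange_of_pos 0 k (by omega), if_neg (by omega)]
      simp [String.toList, PySem.Dict.empty]
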